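-- pv_equiv track=rewrite | github.com/Just-NB/Algorithm | Programmers/19_KAKAO/muzi_mukbang.py | solution
-- ===== SOURCE A (Python) =====
-- import heapq
--
-- def solution(food_times, k):
--     answer = -1
--     leftover = len(food_times)  # 남은 음식의 갯수.
--     food_heap = [[time, idx + 1] for idx, time in enumerate(food_times)]
--     heapq.heapify(food_heap)
--     prev_time = 0
--     while food_heap:
--         food_time, food = food_heap[0]  # 전부 먹는 시간, 먹을 음식
--         eat_time = (food_time - prev_time) * leftover  # 현재 음식의 남은 갯수만큼 모든 음식을 먹을때 걸리는 시간.
--         if k >= eat_time: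
--             k -= eat_time
--             prev_time = heapq.heappop(food_heap)[0]
--             leftover -= 1
--         else:
--             food_heap.sort(key=lambda x: x[1])  # 인덱스 순으로 다시 정렬
--             return food_heap[k % leftover][1]
--     return answer
-- ===== SOURCE B (Python) =====
-- def solution(food_times, k):
--     # Binary-search the threshold time T such that eating every food down to level T
--     # consumes at most k seconds, then pick the survivor by index arithmetic.
--     n = len(food_times)
--     if n == 0:
--         return -1
--     total = sum(food_times)
--     if k >= total:
--         return -1
--
--     def eaten(limit):
--         # seconds spent once every food has been eaten down to (at most) `limit`
--         return sum(min(t, limit) for t in food_times)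
--
--     lo = min(min(food_times), k // n)   # eaten(lo) <= k
--     hi = max(food_times)                # eaten(hi) = total > k
--     while lo + 1 < hi:
--         mid = (lo + hi) // 2
--         if eaten(mid) <= k:
--             lo = mid
--         else:
--             hi = mid
--     survivors = [i + 1 for i, t in enumerate(food_times) if t > lo]
--     return survivors[k - eaten(lo)]
-- ===== Notes on version B (the rewrite author's own statement) =====
-- stated objective: alternative
-- what changed: Replaces A's heap simulation (heapify, repeated heappop with leftover/prev_time bookkeeping) by a binary search on the value range for the largest threshold T with sum(min(t,T)) <= k, then picks the survivor (foods with t > T) by index arithmetic; no heap and no sort of the foods at all.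
import Mathlib
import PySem

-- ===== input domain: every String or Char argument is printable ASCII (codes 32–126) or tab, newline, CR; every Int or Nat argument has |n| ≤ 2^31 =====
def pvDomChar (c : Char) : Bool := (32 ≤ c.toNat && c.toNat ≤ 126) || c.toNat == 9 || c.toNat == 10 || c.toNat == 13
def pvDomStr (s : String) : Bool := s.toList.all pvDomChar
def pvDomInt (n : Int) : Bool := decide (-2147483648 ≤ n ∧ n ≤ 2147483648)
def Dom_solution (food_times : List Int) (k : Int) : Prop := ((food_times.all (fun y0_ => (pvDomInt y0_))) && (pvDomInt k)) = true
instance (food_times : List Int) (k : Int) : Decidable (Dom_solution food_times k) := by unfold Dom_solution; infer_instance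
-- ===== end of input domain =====

-- B drops A's heap simulation entirely: it binary-searches the value range for the largest
-- threshold T with sum(min(t,T)) ≤ k and picks the survivor by index arithmetic; objective: alternative.

-- ===== PORT A =====
-- heapq's observable contract on a heap of DISTINCT [time, idx] pairs is ported exactly:
-- heap[0] / heappop(...) is the lexicographic minimum (PySem.List.min2? = min with tuple key,
-- first extremal — unique here since the idx components are pairwise distinct), heappop removes it
-- (List.erase removes that one element), and the only other observation A makes of the heap is
-- food_heap.sort(key=lambda x: x[1]) — a sort by a key that is distinct across the heap, whose
-- result does not depend on the heap array's internal layout.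
-- Needed by solutionLoop's termination proof (min2? returns a member):
theorem pvLtb (x m : Int × Int) :
    (decide (x.1 < m.1) || (!decide (m.1 < x.1) && decide (x.2 < m.2))) = decide (toLex x < toLex m) := by
  by_cases h1 : x.1 < m.1 <;> by_cases h2 : m.1 < x.1 <;> by_cases h3 : x.2 < m.2 <;>
    simp [h1, h2, h3, Prod.Lex.lt_iff] <;> omega

theorem pvMin2?_eq_min? (xs : List (Int × Int)) :
    PySem.List.min2? xs Prod.fst Prod.snd = PySem.List.min? xs (fun p => toLex p) := by
  unfold PySem.List.min2? PySem.List.min?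
  congr 1
  funext acc x
  cases acc with
  | none => rfl
  | some m =>
    dsimp only
    rw [pvLtb x m]
    by_cases hlt : toLex x < toLex m
    · simp [hlt]
    · simp [hlt]

def solutionLoop (food_heap : List (Int × Int)) (k prev_time leftover : Int) : Int :=
  match hm : PySem.List.min2? food_heap Prod.fst Prod.snd with
  | none => -1                                                   -- while food_heap: … exhausted → return answer (-1)
  | some m =>                                                    -- food_time, food = food_heap[0]
    let eat_time := (m.1 - prev_time) * leftover
    if eat_time ≤ k then                                         -- if k >= eat_time
      solutionLoop (food_heap.erase m) (k - eat_time) m.1 (leftover - 1)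
    else
      -- food_heap.sort(key=lambda x: x[1]); return food_heap[k % leftover][1]
      -- (0 ≤ k % leftover < leftover = len(food_heap) here, so the index never raises; pyGetD's default is never read)
      (PySem.List.pyGetD (PySem.List.sorted food_heap Prod.snd false) (PySem.Int.mod k leftover) (0, 0)).2
termination_by food_heap.length
decreasing_by
  have hmem : m ∈ food_heap := by
    rw [pvMin2?_eq_min?] at hm
    exact PySem.List.min?_mem hm
  have h1 := List.length_erase_of_mem hmem
  have h2 := List.length_pos_of_mem hmem
  omega

def solution (food_times : List Int) (k : Int) : Int :=
  let food_heap := (PySem.List.enumerate food_times 0).map (fun p => (p.2, p.1 + 1))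
  solutionLoop food_heap k 0 (food_times.length : Int)

-- ===== PORT B =====
-- eaten(limit) = sum(min(t, limit) for t in food_times)
def pvEaten (food_times : List Int) (limit : Int) : Int :=
  food_times.foldl (fun acc t => acc + min t limit) 0

-- Needed by pvBSearch's termination proof (the midpoint is strictly between lo and hi):
theorem pvMid_bounds (lo hi : Int) (h : lo + 1 < hi) :
    lo < PySem.Int.floordiv (lo + hi) 2 ∧ PySem.Int.floordiv (lo + hi) 2 < hi := by
  rw [PySem.Int.floordiv_eq_ediv_of_pos (by omega : (0:Int) < 2)]
  omega

-- while lo + 1 < hi: mid = (lo + hi) // 2; if eaten(mid) <= k: lo = mid else: hi = mid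
def pvBSearch (food_times : List Int) (k lo hi : Int) : Int :=
  if h : lo + 1 < hi then
    let mid := PySem.Int.floordiv (lo + hi) 2
    if pvEaten food_times mid ≤ k then pvBSearch food_times k mid hi
    else pvBSearch food_times k lo mid
  else lo
termination_by (hi - lo).toNat
decreasing_by
  · have := pvMid_bounds lo hi h; omega
  · have := pvMid_bounds lo hi h; omega

def solution_alt (food_times : List Int) (k : Int) : Int :=
  let n : Int := (food_times.length : Int)
  if n = 0 then -1
  else
    let total := food_times.foldl (· + ·) 0                      -- total = sum(food_times)
    if total ≤ k then -1                                         -- if k >= total: return -1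
    else
      -- lo = min(min(food_times), k // n); hi = max(food_times)   (list nonempty, so min/max never raise; getD's default is never read)
      let lo := min ((PySem.List.min? food_times (fun t => t)).getD 0) (PySem.Int.floordiv k n)
      let hi := (PySem.List.max? food_times (fun t => t)).getD 0
      let T := pvBSearch food_times k lo hi
      -- survivors = [i + 1 for i, t in enumerate(food_times) if t > lo]
      let survivors := ((PySem.List.enumerate food_times 0).filter (fun p => decide (T < p.2))).map (fun p => p.1 + 1)
      -- return survivors[k - eaten(lo)]   (index is in range here, so it never raises; pyGetD's default is never read)
      PySem.List.pyGetD survivors (k - pvEaten food_times T) 0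

-- ===== PRECONDITION & SPEC =====
def Spec_solution (food_times : List Int) (k : Int) (out : Int) : Prop := out = solution_alt food_times k
instance (food_times : List Int) (k : Int) (out : Int) : Decidable (Spec_solution food_times k out) := by unfold Spec_solution; infer_instance

-- ===== CLAIM (what is proved, stated in full; the proofs are below) =====
def Claim_equal_solution : Prop := ∀ (food_times : List Int) (k : Int), Dom_solution food_times k → Spec_solution food_times k (solution food_times k)

-- ===== LEMMAS AND PROOFS =====

-- The (time, idx+1) pair list and its lex-sorted version (proof-side names for A's data).
def pvPairs (ft : List Int) : List (Int × Int) :=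
  (PySem.List.enumerate ft 0).map (fun p => (p.2, p.1 + 1))

def pvSortedPairs (ft : List Int) : List (Int × Int) :=
  PySem.List.sorted (pvPairs ft) (fun p => toLex p) false

-- A's loop replayed on the lex-sorted pair list (A's heap order), single scan.
def pvScan : List (Int × Int) → Int → Int → Int
  | [], _, _ => -1
  | (t, idx) :: tl, k, prev =>
    let leftover : Int := ((tl.length + 1 : Nat) : Int)
    let eat := (t - prev) * leftover
    if k < eat then
      (PySem.List.pyGetD (PySem.List.sorted ((t, idx) :: tl) Prod.snd false) (PySem.Int.mod k leftover) (0, 0)).2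
    else pvScan tl (k - eat) t

theorem pvEaten_eq_sum (ft : List Int) (T : Int) :
    pvEaten ft T = (ft.map (fun t => min t T)).sum := by
  unfold pvEaten
  rw [PySem.List.foldl_add (g := fun t => min t T)]
  ring

theorem pvEaten_mono (ft : List Int) {T T' : Int} (h : T ≤ T') :
    pvEaten ft T ≤ pvEaten ft T' := by
  rw [pvEaten_eq_sum, pvEaten_eq_sum]
  exact List.sum_le_sum (fun t _ => min_le_min le_rfl h)

theorem pvEaten_le_sum (ft : List Int) (T : Int) : pvEaten ft T ≤ ft.sum := by
  rw [pvEaten_eq_sum]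
  calc (ft.map (fun t => min t T)).sum ≤ (ft.map (fun t => t)).sum :=
        List.sum_le_sum (fun t _ => min_le_left t T)
    _ = ft.sum := by simp

theorem pvEaten_low (ft : List Int) (T : Int) (h : ∀ t ∈ ft, T ≤ t) :
    pvEaten ft T = (ft.length : Int) * T := by
  rw [pvEaten_eq_sum, List.map_congr_left (fun t ht => min_eq_right (h t ht)),
      PySem.List.sum_map_const_int]

theorem pvEaten_high (ft : List Int) (T : Int) (h : ∀ t ∈ ft, t ≤ T) :
    pvEaten ft T = ft.sum := by
  rw [pvEaten_eq_sum, List.map_congr_left (fun t ht => min_eq_left (h t ht))]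
  simp

theorem pvT_unique (ft : List Int) (k T T' : Int)
    (h1 : pvEaten ft T ≤ k) (h2 : k < pvEaten ft (T + 1))
    (h3 : pvEaten ft T' ≤ k) (h4 : k < pvEaten ft (T' + 1)) : T = T' := by
  rcases lt_trichotomy T T' with h | h | h
  · have : pvEaten ft (T + 1) ≤ pvEaten ft T' := pvEaten_mono ft (by omega)
    omega
  · exact h
  · have : pvEaten ft (T' + 1) ≤ pvEaten ft T := pvEaten_mono ft (by omega)
    omega

theorem pvBSearch_spec (ft : List Int) (k : Int) :
    ∀ fuel lo hi, (hi - lo).toNat ≤ fuel →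
    pvEaten ft lo ≤ k → k < pvEaten ft hi →
    pvEaten ft (pvBSearch ft k lo hi) ≤ k ∧ k < pvEaten ft (pvBSearch ft k lo hi + 1) := by
  intro fuel
  induction fuel with
  | zero =>
    intro lo hi hfuel hlo hhi
    have hlohi : lo < hi := by
      by_contra hc
      have := pvEaten_mono ft (show hi ≤ lo by omega)
      omega
    omega
  | succ m ih =>
    intro lo hi hfuel hlo hhi
    have hlohi : lo < hi := by
      by_contra hc
      have := pvEaten_mono ft (show hi ≤ lo by omega)
      omega
    rw [pvBSearch]
    by_cases hcond : lo + 1 < hi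
    · rw [dif_pos hcond]
      have hmid := pvMid_bounds lo hi hcond
      by_cases hle : pvEaten ft (PySem.Int.floordiv (lo + hi) 2) ≤ k
      · simp only [hle, if_pos]
        exact ih _ hi (by omega) hle hhi
      · simp only [hle, if_neg, not_false_iff]
        exact ih lo _ (by omega) hlo (by omega)
    · rw [dif_neg hcond]
      have : hi = lo + 1 := by omega
      exact ⟨hlo, this ▸ hhi⟩

-- ---- A-side bridge: the heap loop equals a single scan of the lex-sorted pair list ----

-- The heap minimum of any permutation of a strictly lex-sorted nonempty list is its head.
theorem pvMin_head (x : Int × Int) (tl h : List (Int × Int))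
    (hperm : h.Perm (x :: tl))
    (hpair : (x :: tl).Pairwise (fun a b => toLex a < toLex b)) :
    PySem.List.min2? h Prod.fst Prod.snd = some x := by
  rw [pvMin2?_eq_min?]
  cases hmm : PySem.List.min? h (fun p => toLex p) with
  | none =>
    rw [PySem.List.min?_eq_none_iff] at hmm
    subst hmm
    exact absurd hperm.symm (by simp)
  | some m =>
    have hmem : m ∈ x :: tl := hperm.mem_iff.mp (PySem.List.min?_mem hmm)
    have hxh : x ∈ h := hperm.mem_iff.mpr (by simp)
    have hle : toLex m ≤ toLex x := PySem.List.min?_isMin hmm x hxh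
    rcases List.mem_cons.mp hmem with h1 | h1
    · rw [h1]
    · have hlt : toLex x < toLex m := (List.pairwise_cons.mp hpair).1 m h1
      exact absurd hle (not_le.mpr hlt)

-- Sorting by the (pairwise distinct) idx key depends only on the multiset of pairs.
theorem pvSorted_snd_eq (h S : List (Int × Int)) (hperm : h.Perm S)
    (hsnd : S.Pairwise (fun a b => a.2 ≠ b.2)) :
    PySem.List.sorted h Prod.snd false = PySem.List.sorted S Prod.snd false := by
  have hys : (PySem.List.sorted S Prod.snd false).Perm S := PySem.List.sorted_perm S Prod.snd false
  have hle : (PySem.List.sorted S Prod.snd false).Pairwise (fun a b => a.2 ≤ b.2) :=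
    PySem.List.sorted_pairwise S Prod.snd
  have hne : (PySem.List.sorted S Prod.snd false).Pairwise (fun a b => a.2 ≠ b.2) :=
    (List.Perm.pairwise_iff (fun hxy => hxy.symm) hys).mpr hsnd
  have hlt : (PySem.List.sorted S Prod.snd false).Pairwise (fun a b => a.2 < b.2) :=
    (hle.and hne).imp (fun hab => lt_of_le_of_ne hab.1 hab.2)
  exact PySem.List.sorted_eq_of_perm_of_pairwise_lt h _ Prod.snd (hys.trans hperm.symm) hlt

-- A's min-extraction loop over any permutation h of the strictly lex-sorted list S
-- computes what the single scan of S computes.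
theorem pvLoop_eq (S : List (Int × Int)) :
    ∀ (h : List (Int × Int)), h.Perm S →
    S.Pairwise (fun a b => toLex a < toLex b) →
    S.Pairwise (fun a b => a.2 ≠ b.2) →
    ∀ (k prev : Int), solutionLoop h k prev (S.length : Int) = pvScan S k prev := by
  induction S with
  | nil =>
    intro h hperm _ _ k prev
    have : h = [] := hperm.eq_nil
    subst this
    rw [solutionLoop]
    simp [PySem.List.min2?, pvScan]
  | cons x tl ih =>
    intro h hperm hpair hsnd k prev
    have hmin := pvMin_head x tl h hperm hpair
    rw [solutionLoop]
    split
    · rename_i heq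
      rw [hmin] at heq
      cases heq
    · rename_i m heq
      rw [hmin] at heq
      injection heq with heq
      subst heq
      simp only [pvScan, List.length_cons]
      by_cases hc : (x.1 - prev) * (((tl.length + 1 : Nat)) : Int) ≤ k
      · rw [if_pos hc, if_neg (not_lt.mpr hc)]
        have hperm' : (h.erase x).Perm tl := by
          have := hperm.erase x
          rwa [List.erase_cons_head] at this
        have hrec := ih (h.erase x) hperm' (List.pairwise_cons.mp hpair).2
          (List.pairwise_cons.mp hsnd).2 (k - (x.1 - prev) * (((tl.length + 1 : Nat)) : Int)) x.1
        have hl1 : (((tl.length + 1 : Nat)) : Int) - 1 = (tl.length : Int) := by push_cast; ring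
        rw [hl1]
        exact hrec
      · rw [if_neg hc, if_pos (lt_of_not_ge hc)]
        rw [pvSorted_snd_eq h (x :: tl) hperm hsnd]

-- ---- basic facts about the pair list ----

theorem pvPairs_snd_lt (ft : List Int) :
    (pvPairs ft).Pairwise (fun a b => a.2 < b.2) := by
  unfold pvPairs
  rw [List.pairwise_map]
  exact (PySem.List.pairwise_lt_enumerate ft 0).imp (fun hab => by dsimp only; omega)

theorem pvSortedPairs_perm (ft : List Int) : (pvSortedPairs ft).Perm (pvPairs ft) :=
  PySem.List.sorted_perm (pvPairs ft) (fun p => toLex p) false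

theorem pvSortedPairs_snd_ne (ft : List Int) :
    (pvSortedPairs ft).Pairwise (fun a b => a.2 ≠ b.2) :=
  (List.Perm.pairwise_iff (fun hxy => hxy.symm) (pvSortedPairs_perm ft)).mpr
    ((pvPairs_snd_lt ft).imp (fun hab => ne_of_lt hab))

theorem pvSortedPairs_lex_lt (ft : List Int) :
    (pvSortedPairs ft).Pairwise (fun a b => toLex a < toLex b) := by
  have hle := PySem.List.sorted_pairwise (pvPairs ft) (fun p => toLex p)
  exact (hle.and (pvSortedPairs_snd_ne ft)).imp
    (fun hab => lt_of_le_of_ne hab.1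
      (fun hEq => hab.2 (congrArg Prod.snd (toLex.injective hEq))))

theorem pvSum_pairs (ft : List Int) (T : Int) :
    ((pvPairs ft).map (fun x => min x.1 T)).sum = pvEaten ft T := by
  rw [pvEaten_eq_sum]
  unfold pvPairs
  rw [List.map_map]
  conv_rhs => rw [← PySem.List.map_snd_enumerate ft 0, List.map_map]
  rfl

theorem pvSum_sorted (ft : List Int) (T : Int) :
    ((pvSortedPairs ft).map (fun x => min x.1 T)).sum = pvEaten ft T := by
  rw [List.Perm.sum_eq ((pvSortedPairs_perm ft).map _), pvSum_pairs]

theorem pvPairs_nodup (ft : List Int) : (pvPairs ft).Nodup :=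
  List.nodup_iff_pairwise_ne.mpr ((pvPairs_snd_lt ft).imp
    (fun hab heq => absurd (heq ▸ hab) (lt_irrefl _)))

theorem pvSortedPairs_nodup (ft : List Int) : (pvSortedPairs ft).Nodup :=
  (pvSortedPairs_perm ft).nodup_iff.mpr (pvPairs_nodup ft)

-- ---- main scan characterisation ----

theorem pvScan_main (ft : List Int) (hft : ft ≠ []) :
    ∀ (S : List (Int × Int)) (k prev C k0 : Int),
    S <:+ pvSortedPairs ft →
    (∀ x ∈ pvSortedPairs ft, x ∉ S → x.1 ≤ prev) →
    (∀ T, prev ≤ T → pvEaten ft T = C + (S.map (fun x => min x.1 T)).sum) →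
    k = k0 - (C + prev * S.length) →
    ((0 ≤ k ∧ ∀ y ∈ S, prev ≤ y.1) ∨ (S = pvSortedPairs ft ∧ prev = 0 ∧ C = 0)) →
    (ft.sum ≤ k0 ∧ pvScan S k prev = -1) ∨
    (∃ T, pvEaten ft T ≤ k0 ∧ k0 < pvEaten ft (T + 1) ∧
      pvScan S k prev = PySem.List.pyGetD
        (((PySem.List.enumerate ft 0).filter (fun p => decide (T < p.2))).map (fun p => p.1 + 1))
        (k0 - pvEaten ft T) 0) := by
  intro S
  induction S with
  | nil =>
    intro k prev C k0 _ _ hHS hk hdis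
    refine Or.inl ⟨?_, rfl⟩
    rcases hdis with ⟨hk0, _⟩ | ⟨hSL, _, _⟩
    · have hT := PySem.List.le_foldl_max ft prev
      have h1 := hHS (ft.foldl max prev) hT.1
      have h2 := pvEaten_high ft (ft.foldl max prev) hT.2
      simp only [List.map_nil, List.sum_nil, List.length_nil, Nat.cast_zero, mul_zero] at h1 hk
      omega
    · exfalso
      have hnil : pvPairs ft = [] := by
        have h := hSL.symm
        unfold pvSortedPairs at h
        rwa [PySem.List.sorted_eq_nil_iff] at h
      cases ft with
      | nil => exact hft rfl
      | cons a t => simp [pvPairs, PySem.List.enumerate_cons] at hnil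
  | cons x tl ih =>
    intro k prev C k0 hsuf hout hHS hk hdis
    obtain ⟨t, idx⟩ := x
    have hpairS : ((t, idx) :: tl).Pairwise (fun a b => toLex a < toLex b) :=
      (pvSortedPairs_lex_lt ft).sublist hsuf.sublist
    have hsndS : ((t, idx) :: tl).Pairwise (fun a b => a.2 ≠ b.2) :=
      (pvSortedPairs_snd_ne ft).sublist hsuf.sublist
    have htail : ∀ y ∈ tl, t ≤ y.1 := by
      intro y hy
      have hlt := (List.pairwise_cons.mp hpairS).1 y hy
      rcases Prod.Lex.lt_iff.mp hlt with h | h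
      · exact le_of_lt h
      · exact le_of_eq h.1
    simp only [List.length_cons] at hk
    push_cast at hk
    simp only [pvScan]
    by_cases hstop : k < (t - prev) * ((tl.length + 1 : Nat) : Int)
    · rw [if_pos hstop]
      refine Or.inr ?_
      have hnpos : (0:Int) < ((tl.length + 1 : Nat) : Int) := by push_cast; omega
      have hFM := PySem.Int.floordiv_mul_add_mod k ((tl.length + 1 : Nat) : Int)
      have hM0 : 0 ≤ PySem.Int.mod k ((tl.length + 1 : Nat) : Int) :=
        PySem.Int.mod_nonneg k hnpos
      have hMn : PySem.Int.mod k ((tl.length + 1 : Nat) : Int) < ((tl.length + 1 : Nat) : Int) :=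
        PySem.Int.mod_lt k hnpos
      have hNL : ((tl.length + 1 : Nat) : Int) = (tl.length : Int) + 1 := by push_cast; ring
      have hTt : prev + PySem.Int.floordiv k ((tl.length + 1 : Nat) : Int) < t := by
        have := (PySem.Int.floordiv_lt_iff_lt_mul (a := k) (q := t - prev) hnpos).mpr hstop
        omega
      -- two facts that depend on which disjunct we are in
      have hHST : ∀ T', prev + PySem.Int.floordiv k ((tl.length + 1 : Nat) : Int) ≤ T' →
          pvEaten ft T' = C + (((t, idx) :: tl).map (fun x => min x.1 T')).sum := by
        rcases hdis with ⟨hknn, _⟩ | ⟨hSL, hprev0, hC0⟩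
        · intro T' hT'
          have hF0 : 0 ≤ PySem.Int.floordiv k ((tl.length + 1 : Nat) : Int) :=
            (PySem.Int.le_floordiv_iff_mul_le (a := k) (q := 0) hnpos).mpr (by omega)
          exact hHS T' (by omega)
        · intro T' _
          rw [hC0, ← pvSum_sorted ft T', ← hSL]
          ring_nf
      have hOut2 : ∀ a ∈ pvSortedPairs ft, a ∉ ((t, idx) :: tl) →
          a.1 ≤ prev + PySem.Int.floordiv k ((tl.length + 1 : Nat) : Int) := by
        rcases hdis with ⟨hknn, _⟩ | ⟨hSL, hprev0, hC0⟩
        · intro a ha hna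
          have hF0 : 0 ≤ PySem.Int.floordiv k ((tl.length + 1 : Nat) : Int) :=
            (PySem.Int.le_floordiv_iff_mul_le (a := k) (q := 0) hnpos).mpr (by omega)
          have := hout a ha hna
          omega
        · intro a ha hna
          exact absurd (hSL ▸ ha) hna
      -- pvEaten at T and T + 1
      have hsumc : ∀ T', T' ≤ t →
          (((t, idx) :: tl).map (fun x => min x.1 T')).sum = ((tl.length + 1 : Nat) : Int) * T' := by
        intro T' hT'
        have hmin : ∀ y ∈ (t, idx) :: tl, min y.1 T' = T' := by
          intro y hy
          rcases List.mem_cons.mp hy with rfl | hy'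
          · exact min_eq_right hT'
          · exact min_eq_right (le_trans hT' (htail y hy'))
        rw [List.map_congr_left hmin, PySem.List.sum_map_const_int]
        simp
      have hEatT : pvEaten ft (prev + PySem.Int.floordiv k ((tl.length + 1 : Nat) : Int)) =
          C + ((tl.length + 1 : Nat) : Int) * (prev + PySem.Int.floordiv k ((tl.length + 1 : Nat) : Int)) := by
        rw [hHST _ le_rfl, hsumc _ (le_of_lt hTt)]
      have hEatT1 : pvEaten ft (prev + PySem.Int.floordiv k ((tl.length + 1 : Nat) : Int) + 1) =
          C + ((tl.length + 1 : Nat) : Int) * (prev + PySem.Int.floordiv k ((tl.length + 1 : Nat) : Int) + 1) := by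
        rw [hHST _ (by omega), hsumc _ (by omega)]
      have hidx : k0 - pvEaten ft (prev + PySem.Int.floordiv k ((tl.length + 1 : Nat) : Int)) =
          PySem.Int.mod k ((tl.length + 1 : Nat) : Int) := by
        rw [hEatT]
        rw [hNL] at hFM ⊢
        linear_combination -hk - hFM
      have hstep : pvEaten ft (prev + PySem.Int.floordiv k ((tl.length + 1 : Nat) : Int) + 1) =
          pvEaten ft (prev + PySem.Int.floordiv k ((tl.length + 1 : Nat) : Int)) +
            ((tl.length + 1 : Nat) : Int) := by
        rw [hEatT, hEatT1]; ring
      refine ⟨prev + PySem.Int.floordiv k ((tl.length + 1 : Nat) : Int),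
        by linarith [hidx, hM0], by linarith [hidx, hMn, hstep], ?_⟩
      set T := prev + PySem.Int.floordiv k ((tl.length + 1 : Nat) : Int) with hTdef
      have hmemS : ∀ a, a ∈ (pvPairs ft).filter (fun p => decide (T < p.1)) ↔ a ∈ (t, idx) :: tl := by
        intro a
        constructor
        · intro ha
          obtain ⟨haP, hdec⟩ := List.mem_filter.mp ha
          have haSL : a ∈ pvSortedPairs ft := (pvSortedPairs_perm ft).mem_iff.mpr haP
          by_contra hnS
          have := hOut2 a haSL hnS
          simp only [decide_eq_true_eq] at hdec
          omega
        · intro ha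
          refine List.mem_filter.mpr
            ⟨(pvSortedPairs_perm ft).mem_iff.mp (hsuf.sublist.subset ha), ?_⟩
          simp only [decide_eq_true_eq]
          rcases List.mem_cons.mp ha with rfl | ha'
          · exact hTt
          · exact lt_of_lt_of_le hTt (htail a ha')
      have hfiltpair : ((pvPairs ft).filter (fun p => decide (T < p.1))).Pairwise
          (fun a b => a.2 < b.2) :=
        (pvPairs_snd_lt ft).sublist List.filter_sublist
      have hfiltnodup : ((pvPairs ft).filter (fun p => decide (T < p.1))).Nodup :=
        (pvPairs_nodup ft).sublist List.filter_sublist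
      have hSnodup : ((t, idx) :: tl).Nodup := (pvSortedPairs_nodup ft).sublist hsuf.sublist
      have hpermF : ((pvPairs ft).filter (fun p => decide (T < p.1))).Perm ((t, idx) :: tl) :=
        (List.perm_ext_iff_of_nodup hfiltnodup hSnodup).mpr hmemS
      have hsorted_eq : PySem.List.sorted ((t, idx) :: tl) Prod.snd false =
          (pvPairs ft).filter (fun p => decide (T < p.1)) :=
        PySem.List.sorted_eq_of_perm_of_pairwise_lt _ _ _ hpermF hfiltpair
      have hfilt_map : (pvPairs ft).filter (fun p => decide (T < p.1)) =
          ((PySem.List.enumerate ft 0).filter (fun p => decide (T < p.2))).map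
            (fun p => (p.2, p.1 + 1)) := by
        unfold pvPairs
        rw [List.filter_map]
        rfl
      have hlenE : (((PySem.List.enumerate ft 0).filter (fun p => decide (T < p.2))).length : Int) =
          ((tl.length + 1 : Nat) : Int) := by
        have h1 := hpermF.length_eq
        rw [hfilt_map, List.length_map] at h1
        rw [h1]
        simp
      rw [hidx, hsorted_eq, hfilt_map]
      rw [PySem.List.pyGetD_eq_getElem _ _ hM0 (by rw [List.length_map]; omega),
          PySem.List.pyGetD_eq_getElem _ _ hM0 (by rw [List.length_map]; omega)]
      rw [List.getElem_map, List.getElem_map]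
    · rw [if_neg hstop]
      have hsuf' : tl <:+ pvSortedPairs ft := (List.suffix_cons (t, idx) tl).trans hsuf
      have hout' : ∀ y ∈ pvSortedPairs ft, y ∉ tl → y.1 ≤ t := by
        intro y hy hnin
        by_cases hyx : y = (t, idx)
        · subst hyx; exact le_refl _
        · have hnS : y ∉ (t, idx) :: tl := by
            intro hmem
            rcases List.mem_cons.mp hmem with h | h
            · exact hyx h
            · exact hnin h
          rcases hdis with ⟨_, hprevle⟩ | ⟨hSL, _, _⟩
          · exact le_trans (hout y hy hnS) (hprevle (t, idx) List.mem_cons_self)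
          · exact absurd (hSL ▸ hy) hnS
      have hHS' : ∀ T, t ≤ T →
          pvEaten ft T = (C + t) + (tl.map (fun x => min x.1 T)).sum := by
        intro T hTt
        have hbase : pvEaten ft T = C + (((t, idx) :: tl).map (fun x => min x.1 T)).sum := by
          rcases hdis with ⟨_, hprevle⟩ | ⟨hSL, hprev0, hC0⟩
          · exact hHS T (le_trans (hprevle (t, idx) List.mem_cons_self) hTt)
          · rw [hC0, ← pvSum_sorted ft T, ← hSL]; ring_nf
        rw [hbase]
        simp only [List.map_cons, List.sum_cons]
        rw [min_eq_left hTt]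
        ring
      have hk' : k - (t - prev) * ((tl.length + 1 : Nat) : Int) =
          k0 - ((C + t) + t * tl.length) := by
        push_cast
        linear_combination hk
      have hdis' : (0 ≤ k - (t - prev) * ((tl.length + 1 : Nat) : Int) ∧
          ∀ y ∈ tl, t ≤ y.1) ∨ (tl = pvSortedPairs ft ∧ t = 0 ∧ C + t = 0) :=
        Or.inl ⟨by omega, htail⟩
      exact ih (k - (t - prev) * ((tl.length + 1 : Nat) : Int)) t (C + t) k0
        hsuf' hout' hHS' hk' hdis' 

-- ===== VERDICT (by name: the statement is the Claim_ definition above) =====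
theorem solution_spec : Claim_equal_solution := by
  unfold Claim_equal_solution Spec_solution
  intro ft k0 _
  cases ft with
  | nil =>
    have hA : solution [] k0 = -1 := by
      unfold solution
      rw [solutionLoop]
      rfl
    have hB : solution_alt [] k0 = -1 := by
      unfold solution_alt
      simp
    rw [hA, hB]
  | cons a t =>
    have hft : (a :: t) ≠ [] := by simp
    -- A's heap loop = the single scan of the lex-sorted pair list
    have hA0 : solution (a :: t) k0 =
        solutionLoop (pvPairs (a :: t)) k0 0 (((a :: t).length : Nat) : Int) := rfl
    have hlen : (((a :: t).length : Nat) : Int) = ((pvSortedPairs (a :: t)).length : Int) := by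
      rw [(pvSortedPairs_perm (a :: t)).length_eq]
      simp [pvPairs, PySem.List.length_enumerate]
    have hA' : solution (a :: t) k0 = pvScan (pvSortedPairs (a :: t)) k0 0 := by
      rw [hA0, hlen]
      exact pvLoop_eq _ _ (pvSortedPairs_perm _).symm (pvSortedPairs_lex_lt _)
        (pvSortedPairs_snd_ne _) k0 0
    -- characterise the scan
    have hmain := pvScan_main (a :: t) hft (pvSortedPairs (a :: t)) k0 0 0 k0
      List.suffix_rfl (fun x hx hnx => absurd hx hnx)
      (fun T _ => by rw [pvSum_sorted]; ring) (by ring)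
      (Or.inr ⟨rfl, rfl, rfl⟩)
    have htot : (a :: t).foldl (· + ·) 0 = (a :: t).sum := by
      rw [PySem.List.foldl_add (g := fun x => x)]
      simp
    have hn0 : ¬ (((a :: t).length : Nat) : Int) = 0 := by
      simp only [List.length_cons]
      push_cast
      omega
    rcases hmain with ⟨hsum, hscan⟩ | ⟨T, h1, h2, hscan⟩
    · rw [hA', hscan]
      unfold solution_alt
      rw [if_neg hn0, if_pos (by rw [htot]; exact hsum)]
    · have hlt : ¬ ((a :: t).foldl (· + ·) 0 ≤ k0) := by
        rw [htot]
        have := pvEaten_le_sum (a :: t) (T + 1)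
        omega
      rw [hA', hscan]
      unfold solution_alt
      rw [if_neg hn0, if_neg hlt]
      simp only [PySem.List.min?_id_cons, PySem.List.max?_id_cons, Option.getD_some]
      have hnpos : (0 : Int) < (((a :: t).length : Nat) : Int) := by simp
      have hlo_le : ∀ e ∈ a :: t,
          min (t.foldl min a) (PySem.Int.floordiv k0 (((a :: t).length : Nat) : Int)) ≤ e := by
        intro e he
        rcases List.mem_cons.mp he with rfl | he'
        · exact le_trans (min_le_left _ _) (PySem.List.foldl_min_le t e).1
        · exact le_trans (min_le_left _ _) ((PySem.List.foldl_min_le t a).2 e he')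
      have hlo : pvEaten (a :: t)
          (min (t.foldl min a) (PySem.Int.floordiv k0 (((a :: t).length : Nat) : Int))) ≤ k0 := by
        rw [pvEaten_low _ _ hlo_le]
        have hfm := PySem.Int.floordiv_mul_add_mod k0 (((a :: t).length : Nat) : Int)
        have hm0 := PySem.Int.mod_nonneg k0 hnpos
        have hmin := min_le_right (t.foldl min a)
          (PySem.Int.floordiv k0 (((a :: t).length : Nat) : Int))
        nlinarith
      have hhi : k0 < pvEaten (a :: t) (t.foldl max a) := by
        have hhi_le : ∀ e ∈ a :: t, e ≤ t.foldl max a := by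
          intro e he
          rcases List.mem_cons.mp he with rfl | he'
          · exact (PySem.List.le_foldl_max t e).1
          · exact (PySem.List.le_foldl_max t a).2 e he'
        rw [pvEaten_high _ _ hhi_le]
        rw [htot] at hlt
        omega
      have hbs := pvBSearch_spec (a :: t) k0
        ((t.foldl max a - min (t.foldl min a)
          (PySem.Int.floordiv k0 (((a :: t).length : Nat) : Int))).toNat) _ _ le_rfl hlo hhi
      have hTeq : pvBSearch (a :: t) k0
          (min (t.foldl min a) (PySem.Int.floordiv k0 (((a :: t).length : Nat) : Int)))
          (t.foldl max a) = T :=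
        pvT_unique _ k0 _ _ hbs.1 hbs.2 h1 h2
      simp only [hTeq]
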